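-- pv_equiv track=rewrite | github.com/TigProg/pandas_splitter | pandas_splitter/pandas_splitter.py | get_batch_boundaries
-- ===== SOURCE A (Python) =====
-- import itertools
-- from collections.abc import Iterator
--
-- def get_batch_boundaries(it: Iterator, chunk_size: int) -> Iterator[tuple[int, int]]:
--     i = j = 0
--     prev_boundaries = None
--     for elem, sub_it in itertools.groupby(it):
--         length = sum(1 for _ in sub_it)
--         j += length
--         if j - i >= chunk_size:
--             if prev_boundaries is not None:
--                 yield prev_boundaries
--             prev_boundaries = i, j
--             i = j
--
--     if prev_boundaries:
--         yield prev_boundaries[0], j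
--     elif j != 0:
--         yield 0, j
-- ===== SOURCE B (Python) =====
-- def get_batch_boundaries(it, chunk_size):
--     xs = list(it)
--     n = len(xs)
--     if n == 0:
--         return
--     # change-points: positions where a new run of equal values begins, plus the end n
--     ends = [p for p, (a, b) in enumerate(zip(xs, xs[1:]), 1) if a != b]
--     ends.append(n)
--     # greedy selection of batch START positions
--     starts = [0]
--     for p in ends:
--         if p - starts[-1] >= chunk_size:
--             starts.append(p)
--     if len(starts) > 1:
--         starts.pop()  # the last batch runs to the end instead
--     yield from zip(starts, starts[1:] + [n])
-- ===== Notes on version B (the rewrite author's own statement) =====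
-- stated objective: alternative
-- what changed: B drops the groupby/run-length-counting generator: it builds the change-point position list by one adjacent-pair comparison pass over the materialised list, greedily selects batch start positions against the last chosen start, and emits the pairs by zipping the starts with their shifted copy (last end patched to n), instead of A's streaming groupby loop with a per-run counting generator and a deferred prev_boundaries buffer.
import Mathlib
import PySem

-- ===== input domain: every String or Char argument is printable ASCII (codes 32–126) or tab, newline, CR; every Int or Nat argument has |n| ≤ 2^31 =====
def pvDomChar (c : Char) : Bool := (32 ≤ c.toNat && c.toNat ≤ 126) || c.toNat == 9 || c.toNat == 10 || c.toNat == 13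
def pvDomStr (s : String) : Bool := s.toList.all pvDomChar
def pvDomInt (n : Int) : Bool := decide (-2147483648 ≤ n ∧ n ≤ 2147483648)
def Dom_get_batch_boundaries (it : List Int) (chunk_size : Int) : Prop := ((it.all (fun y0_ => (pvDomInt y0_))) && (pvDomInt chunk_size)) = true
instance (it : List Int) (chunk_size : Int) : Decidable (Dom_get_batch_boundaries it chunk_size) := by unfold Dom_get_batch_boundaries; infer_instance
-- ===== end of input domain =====

-- B drops the groupby/run-length-counting generator entirely: it materialises the list of
-- change-point positions by comparing adjacent elements, greedily selects batch START
-- positions, and emits the pairs by zipping the starts with their shifted copy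
-- (objective: alternative algorithm of the same cost). Both consume the input iterator.

-- ===== PORT A =====
-- itertools.groupby run lengths: length of each maximal run of consecutive equal elements
def pvRunsAux (x : Int) (n : Int) : List Int → List Int
  | [] => [n]
  | y :: ys => if y == x then pvRunsAux x (n + 1) ys else n :: pvRunsAux y 1 ys

def pvRuns : List Int → List Int
  | [] => []
  | x :: xs => pvRunsAux x 1 xs

-- one iteration of A's for-loop; state = (i, j, prev_boundaries, yielded-so-far)
def pvStepA (chunk_size : Int) (st : Int × Int × Option (Int × Int) × List (Int × Int))
    (length : Int) : Int × Int × Option (Int × Int) × List (Int × Int) :=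
  let i := st.1
  let j := st.2.1 + length
  let prev := st.2.2.1
  let out := st.2.2.2
  if chunk_size ≤ j - i then (j, j, some (i, j), out ++ prev.toList)
  else (i, j, prev, out)

def get_batch_boundaries (it : List Int) (chunk_size : Int) : List (Int × Int) :=
  let st := (pvRuns it).foldl (pvStepA chunk_size) (0, 0, none, [])
  let j := st.2.1
  match st.2.2.1 with
  | some prev => st.2.2.2 ++ [(prev.1, j)]
  | none => if j ≠ 0 then st.2.2.2 ++ [(0, j)] else st.2.2.2

-- ===== PORT B =====
def get_batch_boundaries_alt (it : List Int) (chunk_size : Int) : List (Int × Int) :=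
  let n : Int := it.length
  if n = 0 then []
  else
    -- ends = [p for p, (a, b) in enumerate(zip(xs, xs[1:]), 1) if a != b]; ends.append(n)
    let ends := (((PySem.List.enumerate (it.zip it.tail) 1).filter
        (fun pab => pab.2.1 != pab.2.2)).map (·.1)) ++ [n]
    -- starts[-1] is ported as getLastD 0: starts is never empty (it begins as [0] and only grows)
    let starts := ends.foldl
        (fun S p => if chunk_size ≤ p - S.getLastD 0 then S ++ [p] else S) [0]
    let starts := if 1 < starts.length then starts.dropLast else starts
    starts.zip (starts.tail ++ [n])

-- ===== PRECONDITION & SPEC =====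
def Spec_get_batch_boundaries (it : List Int) (chunk_size : Int) (out : List (Int × Int)) : Prop := out = get_batch_boundaries_alt it chunk_size
instance (it : List Int) (chunk_size : Int) (out : List (Int × Int)) : Decidable (Spec_get_batch_boundaries it chunk_size out) := by unfold Spec_get_batch_boundaries; infer_instance

-- ===== CLAIM (what is proved, stated in full; the proofs are below) =====
def Claim_equal_get_batch_boundaries : Prop := ∀ (it : List Int) (chunk_size : Int), Dom_get_batch_boundaries it chunk_size → Spec_get_batch_boundaries it chunk_size (get_batch_boundaries it chunk_size)

-- ===== LEMMAS AND PROOFS =====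

-- change-point positions of a list, read head-first: current position `pos`, previous value `prev`
def pvChg (pos prev : Int) : List Int → List Int
  | [] => [pos]
  | y :: ys => if y = prev then pvChg (pos + 1) y ys else pos :: pvChg (pos + 1) y ys

-- partial sums (run-end positions) of a list of run lengths
def pvPsums (acc : Int) : List Int → List Int
  | [] => []
  | l :: ls => (acc + l) :: pvPsums (acc + l) ls

-- adjacent pairs of a list
def pvAdj : List Int → List (Int × Int)
  | a :: b :: t => (a, b) :: pvAdj (b :: t)
  | _ => []

-- A's loop body re-expressed over the run-END POSITION p instead of the run length
def pvStepA' (cs : Int) (st : Int × Int × Option (Int × Int) × List (Int × Int))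
    (p : Int) : Int × Int × Option (Int × Int) × List (Int × Int) :=
  if cs ≤ p - st.1 then (p, p, some (st.1, p), st.2.2.2 ++ st.2.2.1.toList)
  else (st.1, p, st.2.2.1, st.2.2.2)

lemma pv_foldA_psums (cs : Int) (ls : List Int) :
    ∀ (i j : Int) (prev : Option (Int × Int)) (out : List (Int × Int)),
      ls.foldl (pvStepA cs) (i, j, prev, out)
        = (pvPsums j ls).foldl (pvStepA' cs) (i, j, prev, out) := by
  induction ls with
  | nil => intro i j prev out; rfl
  | cons l ls ih =>
    intro i j prev out
    simp only [List.foldl_cons, pvPsums, pvStepA, pvStepA']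
    by_cases hc : cs ≤ j + l - i
    · simp only [hc, if_pos]; exact ih _ _ _ _
    · simp only [hc, if_neg, not_false_iff]; exact ih _ _ _ _

lemma pv_psums_runs (rest : List Int) :
    ∀ (x n acc : Int), pvPsums acc (pvRunsAux x n rest) = pvChg (acc + n) x rest := by
  induction rest with
  | nil => intro x n acc; simp [pvRunsAux, pvPsums, pvChg]
  | cons y ys ih =>
    intro x n acc
    by_cases h : y = x
    · simp only [pvRunsAux, pvChg, h, beq_self_eq_true, if_true]
      rw [ih x (n + 1) acc, add_assoc]
    · have hb : (y == x) = false := by simp [h]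
      simp only [pvRunsAux, pvChg, hb, Bool.false_eq_true, if_false, if_neg h, pvPsums]
      rw [ih y 1 (acc + n), add_assoc]

lemma pv_ends_chg (rest : List Int) :
    ∀ (prev pos : Int),
      (((PySem.List.enumerate ((prev :: rest).zip rest) pos).filter
          (fun pab => pab.2.1 != pab.2.2)).map (·.1)) ++ [pos + (rest.length : Int)]
        = pvChg pos prev rest := by
  induction rest with
  | nil => intro prev pos; simp [pvChg]
  | cons y ys ih =>
    intro prev pos
    simp only [List.zip_cons_cons, PySem.List.enumerate_cons, List.filter_cons]
    by_cases h : prev = y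
    · have hb : (prev != y) = false := by simp [h]
      simp only [hb, Bool.false_eq_true, if_false, pvChg, if_pos h.symm]
      rw [← ih y (pos + 1)]
      simp [add_comm, add_left_comm]
    · have hb : (prev != y) = true := by simp [h]
      have h' : ¬ (y = prev) := fun hh => h hh.symm
      simp only [hb, if_true, pvChg, if_neg h', List.map_cons, List.cons_append]
      rw [← ih y (pos + 1)]
      simp [add_comm, add_left_comm]

lemma pv_adj_concat (T : List Int) (y : Int) (hT : T ≠ []) :
    pvAdj (T ++ [y]) = pvAdj T ++ [(T.getLastD 0, y)] := by
  induction T with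
  | nil => exact absurd rfl hT
  | cons a t ih =>
    cases t with
    | nil => simp [pvAdj]
    | cons b t' =>
      simp only [List.cons_append, pvAdj]
      rw [show (b :: t') ++ [y] = (b :: t') ++ [y] from rfl] at *
      have := ih (by simp)
      simp only [List.cons_append] at this
      rw [this]
      simp [List.getLastD]

lemma pv_zip_shift (T : List Int) (n : Int) (hT : T ≠ []) :
    T.zip (T.tail ++ [n]) = pvAdj T ++ [(T.getLastD 0, n)] := by
  induction T with
  | nil => exact absurd rfl hT
  | cons a t ih =>
    cases t with
    | nil => simp [pvAdj]
    | cons b t' =>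
      have hih := ih (by simp)
      simp only [List.tail_cons] at hih
      simp only [List.tail_cons, List.cons_append, List.zip_cons_cons, pvAdj]
      rw [hih]
      simp [List.getLastD]

-- the main loop correspondence: A's state vs B's starts list S
lemma pv_loop (cs : Int) (ps : List Int) :
    ∀ (S : List Int) (j : Int), S ≠ [] →
      let stA := ps.foldl (pvStepA' cs) (S.getLastD 0, j, (pvAdj S).getLast?, (pvAdj S).dropLast)
      let S' := ps.foldl (fun S p => if cs ≤ p - S.getLastD 0 then S ++ [p] else S) S
      S' ≠ [] ∧ S'.head? = S.head? ∧ stA.1 = S'.getLastD 0 ∧ stA.2.1 = ps.getLastD j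
        ∧ stA.2.2.1 = (pvAdj S').getLast? ∧ stA.2.2.2 = (pvAdj S').dropLast := by
  induction ps with
  | nil => intro S j hS; exact ⟨hS, rfl, rfl, rfl, rfl, rfl⟩
  | cons p ps ih =>
    intro S j hS
    simp only [List.foldl_cons, pvStepA']
    by_cases hc : cs ≤ p - S.getLastD 0
    · simp only [hc, if_pos]
      have hgl : (S ++ [p]).getLastD 0 = p := by simp
      have hadj := pv_adj_concat S p hS
      have hdl : (pvAdj (S ++ [p])).dropLast = pvAdj S := by rw [hadj]; simp
      have hlast : (pvAdj (S ++ [p])).getLast? = some (S.getLastD 0, p) := by rw [hadj]; simp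
      have hout : (pvAdj S).dropLast ++ ((pvAdj S).getLast?).toList = pvAdj S := by
        cases h : (pvAdj S).getLast? with
        | none => simp [List.getLast?_eq_none_iff.mp h]
        | some q =>
          obtain ⟨l', hl⟩ := List.getLast?_eq_some_iff.mp h
          rw [hl]; simp
      rw [hout]
      have hrec := ih (S ++ [p]) p (by simp)
      rw [hgl, hlast, hdl] at hrec
      obtain ⟨h1, h2, h3, h4, h5, h6⟩ := hrec
      refine ⟨h1, ?_, h3, ?_, h5, h6⟩
      · rw [h2]
        cases S with
        | nil => exact absurd rfl hS
        | cons a t => simp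
      · rw [h4]
        cases ps with
        | nil => simp
        | cons q qs =>
          conv_rhs => rw [List.getLastD_cons]
    · simp only [hc, if_neg, not_false_iff]
      obtain ⟨h1, h2, h3, h4, h5, h6⟩ := ih S p hS
      refine ⟨h1, h2, h3, ?_, h5, h6⟩
      rw [h4]
      cases ps with
      | nil => simp
      | cons q qs =>
        conv_rhs => rw [List.getLastD_cons]

-- A's fold, rewritten over B's ends list, for nonempty input
lemma pv_A_over_ends (x : Int) (rest : List Int) (cs : Int) :
    (pvRuns (x :: rest)).foldl (pvStepA cs) (0, 0, none, [])
      = ((((PySem.List.enumerate ((x :: rest).zip rest) 1).filter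
          (fun pab => pab.2.1 != pab.2.2)).map (·.1)) ++ [1 + (rest.length : Int)]).foldl
        (pvStepA' cs) (0, 0, none, []) := by
  rw [pv_ends_chg rest x 1]
  rw [show pvChg 1 x rest = pvChg (0 + 1) x rest by norm_num]
  rw [← pv_psums_runs rest x 1 0]
  exact pv_foldA_psums cs (pvRunsAux x 1 rest) 0 0 none []

theorem get_batch_boundaries_spec : Claim_equal_get_batch_boundaries := by
  intro it cs _
  unfold Spec_get_batch_boundaries
  cases it with
  | nil => rfl
  | cons x rest =>
    unfold get_batch_boundaries get_batch_boundaries_alt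
    have hn : ((x :: rest).length : Int) ≠ 0 := by simp; omega
    simp only [List.tail_cons, if_neg hn]
    set ends := (((PySem.List.enumerate ((x :: rest).zip rest) 1).filter
        (fun pab => pab.2.1 != pab.2.2)).map (·.1)) ++ [((x :: rest).length : Int)] with hends
    have hlen : ((x :: rest).length : Int) = 1 + (rest.length : Int) := by simp; omega
    have hA := pv_A_over_ends x rest cs
    rw [← hlen] at hA
    rw [← hends] at hA
    have hloop := pv_loop cs ends [0] 0 (by simp)
    simp only [show ([0] : List Int).getLastD 0 = 0 from rfl,
      show pvAdj [0] = ([] : List (Int × Int)) from rfl,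
      List.getLast?_nil, List.dropLast_nil] at hloop
    obtain ⟨hS'ne, hhead, hi, hj, hprev, hout⟩ := hloop
    set stA := ends.foldl (pvStepA' cs) (0, 0, none, []) with hstA
    set S' := ends.foldl (fun S p => if cs ≤ p - S.getLastD 0 then S ++ [p] else S) [0] with hS'
    have hjn : stA.2.1 = ((x :: rest).length : Int) := by
      rw [hj, hends]; simp
    rw [hA]
    cases hp : stA.2.2.1 with
    | none =>
      -- no cut ever happened: S' = [0]
      have hadjnil : pvAdj S' = [] := by
        rw [hp] at hprev
        exact List.getLast?_eq_none_iff.mp hprev.symm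
      have hS'single : S' = [0] := by
        cases hS'c : S' with
        | nil => exact absurd hS'c hS'ne
        | cons a t =>
          cases t with
          | nil =>
            rw [hS'c] at hhead
            simp at hhead
            simp [hhead]
          | cons b t' => rw [hS'c] at hadjnil; simp [pvAdj] at hadjnil
      have hout0 : stA.2.2.2 = [] := by rw [hout, hadjnil]; rfl
      rw [hjn, hout0, hS'single]
      simp
      omega
    | some pr =>
      -- at least one cut: S' has length ≥ 2
      obtain ⟨a, b, t', hS'c⟩ : ∃ a b t', S' = a :: b :: t' := by
        cases hS'c : S' with
        | nil => exact absurd hS'c hS'ne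
        | cons a t =>
          cases t with
          | nil =>
            rw [hS'c] at hprev
            simp [pvAdj] at hprev
            rw [hp] at hprev; exact absurd hprev (by simp)
          | cons b t' => exact ⟨a, b, t', rfl⟩
      have hne2 : S' ≠ [] := hS'ne
      have hlen2 : 1 < S'.length := by rw [hS'c]; simp
      -- write S' = T ++ [y], T ≠ []
      have hdc : S'.dropLast ++ [S'.getLast hne2] = S' := List.dropLast_append_getLast hne2
      set T := S'.dropLast with hT
      have hTne : T ≠ [] := by
        rw [hT, hS'c]; simp
      have hadjS' : pvAdj S' = pvAdj T ++ [(T.getLastD 0, S'.getLast hne2)] := by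
        conv_lhs => rw [← hdc]
        exact pv_adj_concat T _ hTne
      have hprv : pr = (T.getLastD 0, S'.getLast hne2) := by
        have h2 := hprev; rw [hp, hadjS'] at h2
        simp at h2
        rw [List.getLastD_eq_getLast?]
        exact h2
      have houtv : stA.2.2.2 = pvAdj T := by rw [hout, hadjS']; simp
      rw [hjn, houtv, hprv]
      simp only [if_pos hlen2]
      rw [pv_zip_shift T _ hTne]
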